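-- pv_equiv track=rewrite | github.com/LeeKunHa/Algorithm | 프로그래머스/lv0/120956. 옹알이 （1）/옹알이 （1）.py | solution
-- ===== SOURCE A (Python) =====
-- def solution(babbling):
--     pronoun = ["aya", "ye", "woo", "ma"]
--     answer = 0
--     for i in babbling:
--         while True:
--             if i[:3] == 'aya' or i[:3] == 'woo':
--                 i = i[3:]
--             elif i[:2] == 'ye' or i[:2] == 'ma':
--                 i = i[2:]
--             elif len(i) == 0:
--                 answer = answer+1
--                 break
--             else:
--                 break
--     return answer
-- ===== SOURCE B (Python) =====
-- def _ok(w):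
--     if not w:
--         return True
--     c = w[0]
--     if c == 'a':
--         return w.startswith('aya') and _ok(w[3:])
--     if c == 'w':
--         return w.startswith('woo') and _ok(w[3:])
--     if c == 'y':
--         return w.startswith('ye') and _ok(w[2:])
--     if c == 'm':
--         return w.startswith('ma') and _ok(w[2:])
--     return False
--
--
-- def solution(babbling):
--     return sum(_ok(w) for w in babbling)
-- ===== Notes on version B (the rewrite author's own statement) =====
-- stated objective: alternative
-- what changed: Replaces A's in-place while-loop that repeatedly strips token prefixes off a mutable string with a recursive first-character-dispatch word checker, and replaces the explicit counter with a sum of booleans over the list.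
import Mathlib
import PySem

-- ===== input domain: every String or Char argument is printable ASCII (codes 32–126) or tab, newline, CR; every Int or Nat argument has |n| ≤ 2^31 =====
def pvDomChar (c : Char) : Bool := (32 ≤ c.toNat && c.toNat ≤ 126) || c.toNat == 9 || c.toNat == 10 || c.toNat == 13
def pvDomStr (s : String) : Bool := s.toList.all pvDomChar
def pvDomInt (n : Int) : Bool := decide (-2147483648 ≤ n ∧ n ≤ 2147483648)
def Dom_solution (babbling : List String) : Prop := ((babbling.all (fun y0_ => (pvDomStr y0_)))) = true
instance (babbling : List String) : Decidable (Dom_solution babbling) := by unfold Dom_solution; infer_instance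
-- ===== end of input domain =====

-- B replaces A's while-loop prefix-stripping with a recursive first-char-dispatch word
-- checker summed over the list (objective: simpler); return value only, no mutation.

-- ===== PORT A =====
-- A's inner 'while True' over one word: repeatedly strip a leading token via slices;
-- returns true iff the loop ends in the 'len(i) == 0' branch (answer += 1).
def loopA (i : List Char) : Bool :=
  if PySem.List.slice i none (some 3) = ['a','y','a'] ∨
     PySem.List.slice i none (some 3) = ['w','o','o'] then
    loopA (PySem.List.slice i (some 3) none)
  else if PySem.List.slice i none (some 2) = ['y','e'] ∨
          PySem.List.slice i none (some 2) = ['m','a'] then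
    loopA (PySem.List.slice i (some 2) none)
  else if i.length = 0 then true
  else false
termination_by i.length
decreasing_by
  · rename_i h
    rw [PySem.List.slice_to i (b := 3) (by norm_num)] at h
    rw [PySem.List.slice_from i (a := 3) (by norm_num)]
    rcases h with h | h <;> · have := congrArg List.length h; simp at this ⊢; omega
  · rename_i h
    rw [PySem.List.slice_to i (b := 2) (by norm_num)] at h
    rw [PySem.List.slice_from i (a := 2) (by norm_num)]
    rcases h with h | h <;> · have := congrArg List.length h; simp at this ⊢; omega

def solution (babbling : List String) : Int :=
  babbling.foldl (fun answer i => if loopA i.toList then answer + 1 else answer) 0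

-- ===== PORT B =====
-- B's _ok: empty word matches; otherwise dispatch on the first character and recurse.
def okB : List Char → Bool
  | [] => true
  | c :: rest =>
    if c = 'a' then PySem.Chars.startswith (c :: rest) ['a','y','a'] && okB ((c :: rest).drop 3)
    else if c = 'w' then PySem.Chars.startswith (c :: rest) ['w','o','o'] && okB ((c :: rest).drop 3)
    else if c = 'y' then PySem.Chars.startswith (c :: rest) ['y','e'] && okB ((c :: rest).drop 2)
    else if c = 'm' then PySem.Chars.startswith (c :: rest) ['m','a'] && okB ((c :: rest).drop 2)
    else false
termination_by w => w.length
decreasing_by all_goals simp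

def solution_alt (babbling : List String) : Int :=
  (babbling.map (fun w => if okB w.toList then (1 : Int) else 0)).sum

-- ===== PRECONDITION & SPEC =====
def Spec_solution (babbling : List String) (out : Int) : Prop := out = solution_alt babbling
instance (babbling : List String) (out : Int) : Decidable (Spec_solution babbling out) := by unfold Spec_solution; infer_instance

-- ===== CLAIM (what is proved, stated in full; the proofs are below) =====
def Claim_equal_solution : Prop := ∀ (babbling : List String), Dom_solution babbling → Spec_solution babbling (solution babbling)

-- ===== LEMMAS AND PROOFS =====
theorem loop_eq_ok (l : List Char) : loopA l = okB l := by
  fun_induction loopA l with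
  | case1 i h ih =>
    rw [PySem.List.slice_to i (b := 3) (by norm_num)] at h
    rw [PySem.List.slice_from i (a := 3) (by norm_num)] at ih ⊢
    rcases i with _ | ⟨a, _ | ⟨b, _ | ⟨c, r⟩⟩⟩
    · simp at h
    · rcases h with h | h <;> simp at h
    · rcases h with h | h <;> simp at h
    · rcases h with h | h <;>
      · obtain ⟨rfl, rfl, rfl⟩ : _ ∧ _ ∧ _ := by simpa using h
        simpa [okB, PySem.Chars.startswith] using ih
  | case2 i h1 h2 ih =>
    rw [PySem.List.slice_to i (b := 2) (by norm_num)] at h2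
    rw [PySem.List.slice_from i (a := 2) (by norm_num)] at ih ⊢
    rcases i with _ | ⟨a, _ | ⟨b, r⟩⟩
    · simp at h2
    · rcases h2 with h | h <;> simp at h
    · rcases h2 with h | h <;>
      · obtain ⟨rfl, rfl⟩ : _ ∧ _ := by simpa using h
        simpa [okB, PySem.Chars.startswith] using ih
  | case3 i h1 h2 h3 =>
    obtain rfl : i = [] := List.length_eq_zero_iff.mp h3
    simp [okB]
  | case4 i h1 h2 h3 =>
    rw [PySem.List.slice_to i (b := 3) (by norm_num)] at h1
    rw [PySem.List.slice_to i (b := 2) (by norm_num)] at h2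
    rcases i with _ | ⟨c, r⟩
    · simp at h3
    · simp only [okB]
      split_ifs with hc hw hy hm
      · subst hc
        have hs : PySem.Chars.startswith ('a'::r) ['a','y','a'] = false := by
          rw [← Bool.not_eq_true, PySem.Chars.startswith_iff]
          intro hp
          exact h1 (Or.inl (by obtain ⟨t, ht⟩ := hp; rw [← ht]; simp))
        simp [hs]
      · subst hw
        have hs : PySem.Chars.startswith ('w'::r) ['w','o','o'] = false := by
          rw [← Bool.not_eq_true, PySem.Chars.startswith_iff]
          intro hp
          exact h1 (Or.inr (by obtain ⟨t, ht⟩ := hp; rw [← ht]; simp))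
        simp [hs]
      · subst hy
        have hs : PySem.Chars.startswith ('y'::r) ['y','e'] = false := by
          rw [← Bool.not_eq_true, PySem.Chars.startswith_iff]
          intro hp
          exact h2 (Or.inl (by obtain ⟨t, ht⟩ := hp; rw [← ht]; simp))
        simp [hs]
      · subst hm
        have hs : PySem.Chars.startswith ('m'::r) ['m','a'] = false := by
          rw [← Bool.not_eq_true, PySem.Chars.startswith_iff]
          intro hp
          exact h2 (Or.inr (by obtain ⟨t, ht⟩ := hp; rw [← ht]; simp))
        simp [hs]
      · rfl

theorem fold_eq (babbling : List String) (acc : Int) :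
    babbling.foldl (fun answer i => if loopA i.toList then answer + 1 else answer) acc
      = acc + (babbling.map (fun w => if okB w.toList then (1 : Int) else 0)).sum := by
  induction babbling generalizing acc with
  | nil => simp
  | cons w ws ih =>
    rw [List.foldl_cons, ih]
    simp only [List.map_cons, List.sum_cons, loop_eq_ok]
    split <;> ring

-- ===== VERDICT (by name: the statement is the Claim_ definition above) =====
theorem solution_spec : Claim_equal_solution := by
  intro babbling _
  unfold Spec_solution solution solution_alt
  simpa using fold_eq babbling 0
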